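-- pv_equiv track=rewrite | github.com/aphonologist/directionalHSfooting | fredty.py | ERCs
-- ===== SOURCE A (Python) =====
-- def ERCs(cv):
-- 	W = []
-- 	L = []
--
-- 	for c in range(len(cv)):
-- 		if cv[c] == 'W':
-- 			W.append(c)
-- 		if cv[c] == 'L':
-- 			L.append(c)
--
-- 	WLs = []
-- 	for l in L:
-- 		WL = []
-- 		for w in W:
-- 			WL.append(str(w) + '>>' + str(l))
-- 		WLs.append(WL)
--
-- 	ERC = WLs[0][:]
-- 	for WL in WLs[1:]:
-- 		temp = ERC[:]
-- 		ERC = []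
-- 		for wl in WL:
-- 			for t in temp:
-- 				ERC.append(wl + ',' + t)
-- 	return ERC
-- ===== SOURCE B (Python) =====
-- def ERCs(cv):
--     W = [i for i, ch in enumerate(cv) if ch == 'W']
--     L = [i for i, ch in enumerate(cv) if ch == 'L']
--     WLs = [[str(w) + '>>' + str(l) for w in W] for l in L]
--
--     def prod(fs):
--         if not fs:
--             return [[]]
--         return [[x] + rest for x in fs[0] for rest in prod(fs[1:])]
--
--     return [','.join(combo) for combo in prod(WLs[::-1])]
-- ===== Notes on version B (the rewrite author's own statement) =====
-- stated objective: alternative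
-- what changed: Index scan via enumerate comprehensions and a recursive cartesian product over the reversed factor list with a final join, replacing A's incremental copy-and-rebuild accumulator loop.
import Mathlib
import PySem

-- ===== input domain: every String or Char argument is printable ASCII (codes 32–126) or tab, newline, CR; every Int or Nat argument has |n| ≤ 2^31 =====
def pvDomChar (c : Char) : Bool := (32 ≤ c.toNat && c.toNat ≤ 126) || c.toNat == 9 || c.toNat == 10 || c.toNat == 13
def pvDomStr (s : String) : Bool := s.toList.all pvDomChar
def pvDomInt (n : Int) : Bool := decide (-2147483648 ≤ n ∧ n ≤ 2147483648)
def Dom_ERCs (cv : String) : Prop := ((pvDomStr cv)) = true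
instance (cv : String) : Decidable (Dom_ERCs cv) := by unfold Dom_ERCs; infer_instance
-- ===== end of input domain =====

-- B replaces A's incremental product accumulator with a recursive cartesian product over
-- the reversed factor list plus a final join (objective: alternative decomposition).

-- ===== PORT A =====
def ERCs (cv : String) : List String :=
  let p := (PySem.List.pyRange 0 (PySem.Str.len cv) 1).foldl
    (fun (p : List Int × List Int) (c : Int) =>
      let p1 := if PySem.Str.pyGet? cv c = some 'W' then (p.1 ++ [c], p.2) else p
      if PySem.Str.pyGet? cv c = some 'L' then (p1.1, p1.2 ++ [c]) else p1)
    ([], [])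
  let W := p.1
  let L := p.2
  let WLs := L.foldl
    (fun WLs l =>
      WLs ++ [W.foldl (fun WL w => WL ++ [PySem.Int.toStr w ++ ">>" ++ PySem.Int.toStr l]) []])
    []
  match WLs with
  | [] => []    -- Python A raises IndexError (WLs[0]) here; excluded by Pre_ERCs
  | e :: rest =>
    rest.foldl
      (fun ERC WL =>
        WL.foldl (fun acc wl => ERC.foldl (fun acc2 t => acc2 ++ [wl ++ "," ++ t]) acc) [])
      e

-- ===== PORT B =====
-- recursive cartesian product, first factor varies slowest (Source B's prod)
def pyProdS : List (List String) → List (List String)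
  | [] => [[]]
  | f :: rest => f.flatMap (fun x => (pyProdS rest).map (fun c => x :: c))

def ERCs_alt (cv : String) : List String :=
  let pairs := PySem.List.enumerate cv.toList 0
  let W := (pairs.filter (fun q => q.2 == 'W')).map (fun q => q.1)
  let L := (pairs.filter (fun q => q.2 == 'L')).map (fun q => q.1)
  let WLs := L.map (fun l => W.map (fun w => PySem.Int.toStr w ++ ">>" ++ PySem.Int.toStr l))
  (pyProdS WLs.reverse).map (fun combo => PySem.Str.join "," combo)

-- ===== PRECONDITION & SPEC =====
-- Pre_ excludes exactly the inputs containing no L-marker character, on which A raises IndexError (WLs[0] of an empty list).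
def Pre_ERCs (cv : String) : Prop := 'L' ∈ cv.toList
instance (cv : String) : Decidable (Pre_ERCs cv) := by unfold Pre_ERCs; infer_instance
def pvWitness_ERCs : String := "WL"

def Spec_ERCs (cv : String) (out : List String) : Prop := out = ERCs_alt cv
instance (cv : String) (out : List String) : Decidable (Spec_ERCs cv out) := by unfold Spec_ERCs; infer_instance

-- ===== CLAIM (what is proved, stated in full; the proofs are below) =====
def Claim_equal_ERCs : Prop := ∀ (cv : String), Dom_ERCs cv → Pre_ERCs cv → Spec_ERCs cv (ERCs cv)

-- ===== LEMMAS AND PROOFS =====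

-- B-side scan step as a fold step (proof intermediary between A's index loop and B's filters)
def pvStepB (p : List Int × List Int) (q : Int × Char) : List Int × List Int :=
  let p1 := if q.2 = 'W' then (p.1 ++ [q.1], p.2) else p
  if q.2 = 'L' then (p1.1, p1.2 ++ [q.1]) else p1

-- pvGlue ["a","b"] e = "a," ++ "b," ++ e : A's strings, built back-to-front
def pvGlue (c : List String) (e : String) : String :=
  c.foldr (fun y acc => y ++ "," ++ acc) e

lemma pvScan_aux (cv : String) :
    ∀ (ys : List Char) (k : ℕ), cv.toList.drop k = ys →
    ∀ (acc : List Int × List Int),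
    (PySem.List.pyRange (k : Int) (PySem.Str.len cv) 1).foldl
      (fun (p : List Int × List Int) (c : Int) =>
        let p1 := if PySem.Str.pyGet? cv c = some 'W' then (p.1 ++ [c], p.2) else p
        if PySem.Str.pyGet? cv c = some 'L' then (p1.1, p1.2 ++ [c]) else p1)
      acc
    = (PySem.List.enumerate ys (k : Int)).foldl pvStepB acc := by
  intro ys
  induction ys with
  | nil =>
    intro k hk acc
    have hlen : cv.toList.length ≤ k := by
      by_contra h
      have := List.drop_eq_nil_iff.mp hk
      omega
    rw [PySem.List.pyRange_one_eq_nil (by simp [PySem.Str.len_eq]; exact_mod_cast hlen)]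
    simp [PySem.List.enumerate]
  | cons y ys ih =>
    intro k hk acc
    have hklt : k < cv.toList.length := by
      by_contra h
      rw [List.drop_eq_nil_iff.mpr (by omega)] at hk
      simp at hk
    have hget : cv.toList[k]? = some y := by
      have h0 : (cv.toList.drop k)[0]? = cv.toList[k + 0]? := List.getElem?_drop
      rw [hk] at h0
      simpa using h0.symm
    rw [PySem.List.pyRange_one_cons (by simp [PySem.Str.len_eq]; exact_mod_cast hklt)]
    rw [List.foldl_cons]
    have hdrop : cv.toList.drop (k + 1) = ys := by
      have hdd : (cv.toList.drop k).drop 1 = cv.toList.drop (k + 1) := List.drop_drop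
      rw [← hdd, hk]
      rfl
    have := ih (k + 1) hdrop
    rw [show ((k : Int) + 1) = ((k + 1 : ℕ) : Int) by push_cast; ring] at *
    rw [this]
    rw [PySem.List.enumerate_cons, List.foldl_cons]
    have hq : PySem.Str.pyGet? cv (k : Int) = some y := by
      rw [PySem.Str.pyGet?_natCast]; exact hget
    simp only [pvStepB, hq, Option.some_inj]
    norm_cast

lemma pvFoldB (l : List (Int × Char)) :
    ∀ acc : List Int × List Int,
    l.foldl pvStepB acc
    = (acc.1 ++ ((l.filter (fun q => q.2 == 'W')).map (fun q => q.1)),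
       acc.2 ++ ((l.filter (fun q => q.2 == 'L')).map (fun q => q.1))) := by
  induction l with
  | nil => intro acc; simp
  | cons q l ih =>
    intro acc
    rw [List.foldl_cons, ih]
    by_cases hw : q.2 = 'W'
    · simp [pvStepB, hw]
    · by_cases hl : q.2 = 'L'
      · simp [pvStepB, hl]
      · simp [pvStepB, hw, hl]

lemma pvProd_append (l : List (List String)) (F : List String) :
    pyProdS (l ++ [F]) = (pyProdS l).flatMap (fun c => F.map (fun x => c ++ [x])) := by
  induction l with
  | nil =>
    show List.flatMap (fun x => [[x]]) F = _
    simp only [pyProdS, List.flatMap_cons, List.flatMap_nil, List.append_nil]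
    exact List.map_eq_flatMap.symm
  | cons f l ih =>
    simp only [List.cons_append, pyProdS, ih, List.map_flatMap, List.map_map]
    simp [List.flatMap_assoc, List.flatMap_map, Function.comp_def]

lemma pvJoin_cons_cons (a b : String) (r : List String) :
    PySem.Str.join "," (a :: b :: r) = a ++ "," ++ PySem.Str.join "," (b :: r) := by
  simp only [PySem.Str.join, List.map_cons, PySem.Chars.join_cons_cons]
  rw [List.append_assoc, String.ofList_append]
  rw [show (String.ofList (("," : String).toList ++ PySem.Chars.join (",".toList) (b.toList :: List.map String.toList r)))
      = "," ++ String.ofList (PySem.Chars.join (",".toList) (b.toList :: List.map String.toList r)) by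
    rw [String.ofList_append]; simp]
  simp [String.append_assoc]

lemma pvJoin_eq_glue (c : List String) (x : String) :
    PySem.Str.join "," (c ++ [x]) = pvGlue c x := by
  induction c with
  | nil => simp [PySem.Str.join, pvGlue, PySem.Chars.join_singleton]
  | cons y c ih =>
    simp only [List.cons_append]
    cases c with
    | nil =>
      rw [List.nil_append] at *
      rw [pvJoin_cons_cons]
      simp only [pvGlue, List.foldr_cons, List.foldr_nil] at ih ⊢
      rw [ih]
    | cons z c =>
      simp only [List.cons_append] at ih ⊢
      rw [pvJoin_cons_cons, ih]
      rfl

lemma pvGlue_snoc (c : List String) (x : String) (e : String) :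
    pvGlue (c ++ [x]) e = pvGlue c (x ++ "," ++ e) := by
  simp [pvGlue, List.foldr_append]

lemma pvFoldA (t : List (List String)) :
    ∀ (E : List String),
    t.foldl
      (fun ERC WL =>
        WL.foldl (fun acc wl => ERC.foldl (fun acc2 u => acc2 ++ [wl ++ "," ++ u]) acc) [])
      E
    = (pyProdS t.reverse).flatMap (fun c => E.map (fun e => pvGlue c e)) := by
  induction t with
  | nil => intro E; simp [pyProdS, pvGlue]
  | cons F t ih =>
    intro E
    rw [List.foldl_cons, ih]
    have hstep : F.foldl (fun acc wl => E.foldl (fun acc2 u => acc2 ++ [wl ++ "," ++ u]) acc) []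
        = F.flatMap (fun wl => E.map (fun u => wl ++ "," ++ u)) := by
      calc F.foldl (fun acc wl => E.foldl (fun acc2 u => acc2 ++ [wl ++ "," ++ u]) acc) []
          = F.foldl (fun acc wl => acc ++ E.map (fun u => wl ++ "," ++ u)) [] := by
            have hfn : (fun (acc : List String) wl => E.foldl (fun acc2 u => acc2 ++ [wl ++ "," ++ u]) acc)
                = (fun acc wl => acc ++ E.map (fun u => wl ++ "," ++ u)) := by
              funext acc wl
              exact PySem.List.foldl_append_singleton_eq_map _ E acc
            rw [hfn]
        _ = _ := by
            rw [PySem.List.foldl_append_eq_flatMap]; rfl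
    rw [hstep]
    rw [List.reverse_cons, pvProd_append]
    rw [List.flatMap_assoc]
    refine List.flatMap_congr (fun c _ => ?_)
    rw [List.flatMap_map, List.map_flatMap]
    refine List.flatMap_congr (fun wl _ => ?_)
    simp [List.map_map, Function.comp_def, pvGlue_snoc]

-- ===== VERDICT (by name: the statement is the Claim_ definition above) =====
theorem ERCs_spec : Claim_equal_ERCs := by
  intro cv _ hpre
  unfold Spec_ERCs ERCs ERCs_alt
  -- stage 1: A's index scan = B's enumerate filters
  have hscan := pvScan_aux cv cv.toList 0 rfl ([], [])
  rw [show (((0 : ℕ) : Int)) = (0 : Int) by norm_cast] at hscan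
  rw [hscan, pvFoldB]
  simp only [List.nil_append]
  set pairs := PySem.List.enumerate cv.toList 0 with hpairs
  set W := (pairs.filter (fun q => q.2 == 'W')).map (fun q => q.1) with hW
  set L := (pairs.filter (fun q => q.2 == 'L')).map (fun q => q.1) with hL
  -- stage 2: A's WLs accumulation = B's map of maps
  have hWLs : L.foldl
      (fun WLs l =>
        WLs ++ [W.foldl (fun WL w => WL ++ [PySem.Int.toStr w ++ ">>" ++ PySem.Int.toStr l]) []])
      []
      = L.map (fun l => W.map (fun w => PySem.Int.toStr w ++ ">>" ++ PySem.Int.toStr l)) := by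
    rw [PySem.List.foldl_append_singleton_eq_map
      (fun l => W.foldl (fun WL w => WL ++ [PySem.Int.toStr w ++ ">>" ++ PySem.Int.toStr l]) []) L []]
    rw [List.nil_append]
    refine List.map_congr_left (fun l _ => ?_)
    exact PySem.List.foldl_append_singleton_eq_map _ W []
  rw [hWLs]
  -- Pre_: L is nonempty
  have hLne : L ≠ [] := by
    have hmem : ('L' : Char) ∈ pairs.map (fun q => q.2) := by
      rw [hpairs, PySem.List.map_snd_enumerate]
      exact hpre
    obtain ⟨q, hq, hq2⟩ := List.mem_map.mp hmem
    intro hnil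
    rw [hL] at hnil
    have : q ∈ pairs.filter (fun q => q.2 == 'L') := by
      simp [List.mem_filter, hq, hq2]
    simp [List.map_eq_nil_iff.mp hnil] at this
  -- stage 3: A's incremental product = B's recursive product + join
  obtain ⟨l0, Lt, hLsplit⟩ := List.exists_cons_of_ne_nil hLne
  rw [hLsplit, List.map_cons]
  dsimp only
  rw [pvFoldA]
  rw [List.reverse_cons, pvProd_append, List.map_flatMap]
  refine (List.flatMap_congr (fun c _ => ?_)).symm
  rw [List.map_map]
  refine List.map_congr_left (fun x _ => ?_)
  exact pvJoin_eq_glue c x
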